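-- pv_equiv track=rewrite | github.com/hirosuzuki/procon | atcoder/arc096/d.py | solve
-- ===== SOURCE A (Python) =====
-- def solve(N, C, xv):
--
--     from itertools import accumulate
--
--     xs = [0] + [_[0] for _ in xv] + [C]
--     vs = [0] + [_[1] for _ in xv] + [0]
--     xs_rev = [C - x for x in xs[::-1]]
--     vs_rev = vs[::-1]
--
--     ts = accumulate(vs)
--     txs = [t - x for x, t in zip(xs, ts)]
--     maxtxs = list(accumulate(txs, max))
--
--     ts_rev = accumulate(vs_rev)
--     txs_rev = [t - x for x, t in zip(xs_rev, ts_rev)]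
--     maxtxs_rev = list(accumulate(txs_rev, max))
--
--     return max(
--         max(tx - xs_rev[i] + maxtxs[N - i] for i, tx in enumerate(txs_rev[:-1])),
--         max(tx - xs[i] + maxtxs_rev[N - i] for i, tx in enumerate(txs[:-1]))
--     )
-- ===== SOURCE B (Python) =====
-- def solve(N, C, xv):
--     # Quadratic brute-force recomputation: every prefix table is rebuilt from
--     # scratch by a slice scan (no accumulate / running maxima, no [::-1] trick),
--     # and a single loop takes the best of the two walk directions.
--     xs = [0] + [x for x, _ in xv] + [C]
--     vs = [0] + [v for _, v in xv] + [0]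
--     n2 = len(xs)
--     xs_rev = [C - xs[n2 - 1 - k] for k in range(n2)]
--     vs_rev = [vs[n2 - 1 - k] for k in range(n2)]
--     txs = [sum(vs[:k + 1]) - xs[k] for k in range(n2)]
--     txs_rev = [sum(vs_rev[:k + 1]) - xs_rev[k] for k in range(n2)]
--     maxtxs = [max(txs[:k + 1]) for k in range(n2)]
--     maxtxs_rev = [max(txs_rev[:k + 1]) for k in range(n2)]
--     best = None
--     for i in range(n2 - 1):
--         cand = max(txs_rev[i] - xs_rev[i] + maxtxs[N - i],
--                    txs[i] - xs[i] + maxtxs_rev[N - i])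
--         if best is None or cand > best:
--             best = cand
--     return best
-- ===== Notes on version B (the rewrite author's own statement) =====
-- stated objective: alternative
-- what changed: Replaces A's accumulate-based single pass (running prefix sums and running maxima over reversed slices, two generator maxes) by a quadratic brute force that rebuilds every prefix-sum and prefix-maximum table from scratch with direct slice scans and takes the best of both walk directions in one explicit loop.
import Mathlib
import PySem

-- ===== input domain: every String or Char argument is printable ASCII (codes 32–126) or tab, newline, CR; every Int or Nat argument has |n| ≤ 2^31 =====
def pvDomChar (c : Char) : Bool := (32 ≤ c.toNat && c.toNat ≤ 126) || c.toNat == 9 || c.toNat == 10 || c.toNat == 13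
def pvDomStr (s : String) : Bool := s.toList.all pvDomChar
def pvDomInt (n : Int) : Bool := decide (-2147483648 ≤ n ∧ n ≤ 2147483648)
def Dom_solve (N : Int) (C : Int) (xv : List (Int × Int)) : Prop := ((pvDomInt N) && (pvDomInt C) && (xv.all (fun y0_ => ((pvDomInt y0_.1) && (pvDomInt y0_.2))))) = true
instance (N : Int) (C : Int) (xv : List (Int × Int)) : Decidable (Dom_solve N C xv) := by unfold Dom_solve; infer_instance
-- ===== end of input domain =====

-- B replaces A's accumulate/running-maximum linear pass by an explicit quadratic
-- brute force over every (left-reach, right-reach) pair; alternative algorithm, not faster.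


-- ===== PORT A =====
-- itertools.accumulate(lst, op): running fold, first element kept unchanged.
def pyAccAux (op : Int → Int → Int) (acc : Int) : List Int → List Int
  | [] => []
  | x :: r => op acc x :: pyAccAux op (op acc x) r

def pyAccum (op : Int → Int → Int) : List Int → List Int
  | [] => []
  | x :: r => x :: pyAccAux op x r

-- Python max(xs) on a nonempty list (the two generators in solve are never empty; [] is unreachable).
def pyMaxList : List Int → Int
  | [] => 0
  | x :: r => r.foldl max x

def solve (N : Int) (C : Int) (xv : List (Int × Int)) : Int :=
  let xs : List Int := 0 :: (xv.map (fun p => p.1) ++ [C])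
  let vs : List Int := 0 :: (xv.map (fun p => p.2) ++ [0])
  let xs_rev : List Int := xs.reverse.map (fun x => C - x)   -- xs[::-1] then C - x
  let vs_rev : List Int := vs.reverse
  let ts := pyAccum (· + ·) vs
  let txs := (xs.zip ts).map (fun p => p.2 - p.1)
  let maxtxs := pyAccum max txs
  let ts_rev := pyAccum (· + ·) vs_rev
  let txs_rev := (xs_rev.zip ts_rev).map (fun p => p.2 - p.1)
  let maxtxs_rev := pyAccum max txs_rev
  -- txs_rev[:-1] = dropLast (PySem.List.slice_to_neg_one)
  max
    (pyMaxList ((PySem.List.enumerate txs_rev.dropLast).map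
      (fun p => p.2 - PySem.List.pyGetD xs_rev p.1 0 + PySem.List.pyGetD maxtxs (N - p.1) 0)))
    (pyMaxList ((PySem.List.enumerate txs.dropLast).map
      (fun p => p.2 - PySem.List.pyGetD xs p.1 0 + PySem.List.pyGetD maxtxs_rev (N - p.1) 0)))

-- ===== PORT B =====
def solve_alt (N : Int) (C : Int) (xv : List (Int × Int)) : Int :=
  let xs : List Int := 0 :: (xv.map (fun p => p.1) ++ [C])
  let vs : List Int := 0 :: (xv.map (fun p => p.2) ++ [0])
  let n2 : Int := (xs.length : Int)
  let xs_rev := (PySem.List.pyRange 0 n2 1).map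
    (fun k => C - PySem.List.pyGetD xs (n2 - 1 - k) 0)
  let vs_rev := (PySem.List.pyRange 0 n2 1).map
    (fun k => PySem.List.pyGetD vs (n2 - 1 - k) 0)
  let txs := (PySem.List.pyRange 0 n2 1).map
    (fun k => (PySem.List.slice vs none (some (k + 1))).sum - PySem.List.pyGetD xs k 0)
  let txs_rev := (PySem.List.pyRange 0 n2 1).map
    (fun k => (PySem.List.slice vs_rev none (some (k + 1))).sum - PySem.List.pyGetD xs_rev k 0)
  let maxtxs := (PySem.List.pyRange 0 n2 1).map
    (fun k => pyMaxList (PySem.List.slice txs none (some (k + 1))))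
  let maxtxs_rev := (PySem.List.pyRange 0 n2 1).map
    (fun k => pyMaxList (PySem.List.slice txs_rev none (some (k + 1))))
  let best := (PySem.List.pyRange 0 (n2 - 1) 1).foldl (fun (best : Option Int) i =>
    let cand := max
      (PySem.List.pyGetD txs_rev i 0 - PySem.List.pyGetD xs_rev i 0
        + PySem.List.pyGetD maxtxs (N - i) 0)
      (PySem.List.pyGetD txs i 0 - PySem.List.pyGetD xs i 0
        + PySem.List.pyGetD maxtxs_rev (N - i) 0)
    match best with      -- "if best is None or cand > best: best = cand"
    | none => some cand
    | some b => if cand > b then some cand else some b) none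
  best.getD 0   -- the loop runs at least once, so best is never none; 0 unreachable

-- ===== PRECONDITION & SPEC =====
-- Pre_ excludes exactly the inputs on which A raises IndexError: the index maxtxs[N - i]
-- (taken for i = 0 .. len(xv)) stays inside the length-(len(xv)+2) list, under Python's
-- negative-index rule, precisely when -2 ≤ N ≤ len(xv) + 1.
def Pre_solve (N : Int) (C : Int) (xv : List (Int × Int)) : Prop :=
  -2 ≤ N ∧ N ≤ (xv.length : Int) + 1
instance (N : Int) (C : Int) (xv : List (Int × Int)) : Decidable (Pre_solve N C xv) := by
  unfold Pre_solve; infer_instance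

def pvWitness_solve : Int × Int × (List (Int × Int)) := (2, 10, [(2, 5), (6, 7)])

def Spec_solve (N : Int) (C : Int) (xv : List (Int × Int)) (out : Int) : Prop := out = solve_alt N C xv
instance (N : Int) (C : Int) (xv : List (Int × Int)) (out : Int) : Decidable (Spec_solve N C xv out) := by
  unfold Spec_solve; infer_instance

-- ===== CLAIM (what is proved, stated in full; the proofs are below) =====
def Claim_equal_solve : Prop := ∀ (N : Int) (C : Int) (xv : List (Int × Int)),
  Dom_solve N C xv → Pre_solve N C xv → Spec_solve N C xv (solve N C xv)

-- ===== LEMMAS AND PROOFS =====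

-- max of h 0 .. h k
def bmax (h : Nat → Int) : Nat → Int
  | 0 => h 0
  | k + 1 => max (bmax h k) (h (k + 1))

theorem bmax_congr {h1 h2 : Nat → Int} {k : Nat} (H : ∀ j, j ≤ k → h1 j = h2 j) :
    bmax h1 k = bmax h2 k := by
  induction k with
  | zero => simpa [bmax] using H 0 (le_refl 0)
  | succ k ih =>
    simp only [bmax]
    rw [ih (fun j hj => H j (Nat.le_succ_of_le hj)), H (k+1) (le_refl _)]

theorem bmax_max (u v : Nat → Int) (k : Nat) :
    bmax (fun i => max (u i) (v i)) k = max (bmax u k) (bmax v k) := by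
  induction k with
  | zero => simp [bmax]
  | succ k ih => simp only [bmax, ih]; omega

-- accumulate(+) as prefix sums
theorem pyAccAux_add (L : List Int) : ∀ s : Int,
    pyAccAux (· + ·) s L = (List.range L.length).map (fun k => s + (L.take (k + 1)).sum) := by
  induction L with
  | nil => intro s; simp [pyAccAux]
  | cons x r ih =>
    intro s
    simp only [pyAccAux, ih (s + x), List.length_cons, List.range_succ_eq_map,
      List.map_cons, List.map_map]
    refine List.cons_eq_cons.mpr ⟨by simp, ?_⟩
    apply List.map_congr_left; intro k _
    simp [Function.comp, List.take_succ_cons, add_assoc]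

theorem pyAccum_add (L : List Int) :
    pyAccum (· + ·) L = (List.range L.length).map (fun k => (L.take (k + 1)).sum) := by
  cases L with
  | nil => simp [pyAccum]
  | cons x r =>
    simp only [pyAccum, pyAccAux_add, List.length_cons, List.range_succ_eq_map,
      List.map_cons, List.map_map]
    refine List.cons_eq_cons.mpr ⟨by simp, ?_⟩
    apply List.map_congr_left; intro k _
    simp [Function.comp, List.take_succ_cons]

-- running maxima
theorem bmax_shift (x : Int) (r : List Int) (k : Nat) :
    bmax (fun j => (x :: r).getD j 0) (k + 1) = max x (bmax (fun j => r.getD j 0) k) := by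
  induction k with
  | zero => simp [bmax]
  | succ k ih => simp only [bmax] at *; rw [ih]; simp [max_assoc]

theorem foldl_take_max (r : List Int) : ∀ (k : Nat) (x : Int), k < r.length →
    (r.take (k + 1)).foldl max x = max x (bmax (fun j => r.getD j 0) k) := by
  induction r with
  | nil => intro k x hk; simp at hk
  | cons y t ih =>
    intro k x hk
    cases k with
    | zero => simp [bmax]
    | succ k =>
      have hk' : k < t.length := by simpa using hk
      rw [List.take_succ_cons, List.foldl_cons, ih k (max x y) hk', bmax_shift]
      simp [max_assoc]

theorem pyAccum_max (L : List Int) :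
    pyAccum max L = (List.range L.length).map (fun k => bmax (fun j => L.getD j 0) k) := by
  cases L with
  | nil => simp [pyAccum]
  | cons x r =>
    simp only [pyAccum, List.length_cons, List.range_succ_eq_map, List.map_cons, List.map_map]
    refine List.cons_eq_cons.mpr ⟨by simp [bmax], ?_⟩
    have aux : ∀ (r' : List Int) (x' : Int),
        pyAccAux max x' r' = (List.range r'.length).map
          (fun k => (r'.take (k + 1)).foldl max x') := by
      intro r'
      induction r' with
      | nil => intro x'; simp [pyAccAux]
      | cons y t ih =>
        intro x'
        simp only [pyAccAux, ih, List.length_cons, List.range_succ_eq_map,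
          List.map_cons, List.map_map]
        refine List.cons_eq_cons.mpr ⟨by simp, ?_⟩
        apply List.map_congr_left; intro k _; simp [Function.comp, List.take_succ_cons]
    rw [aux]
    apply List.map_congr_left
    intro k hk
    simp only [Function.comp]
    rw [foldl_take_max r k x (List.mem_range.mp hk), bmax_shift]

-- zip with an indexed map
theorem zip_map_range (l : List Int) : ∀ f : Nat → Int,
    ((l.zip ((List.range l.length).map f)).map (fun p => p.2 - p.1))
      = (List.range l.length).map (fun k => f k - l.getD k 0) := by
  induction l with
  | nil => intro f; simp
  | cons x r ih =>
    intro f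
    simp only [List.length_cons, List.range_succ_eq_map, List.map_cons, List.map_map,
      List.zip_cons_cons]
    refine List.cons_eq_cons.mpr ⟨by simp, ?_⟩
    rw [show (List.range r.length).map (f ∘ Nat.succ) =
          (List.range r.length).map (fun k => (f ∘ Nat.succ) k) from rfl, ih (f ∘ Nat.succ)]
    apply List.map_congr_left; intro k _; simp [Function.comp]

-- enumerate of an indexed map
theorem enumerate_map_range (m : Nat) : ∀ (f : Nat → Int) (s : Int),
    PySem.List.enumerate ((List.range m).map f) s
      = (List.range m).map (fun (k : Nat) => (s + (k : Int), f k)) := by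
  induction m with
  | zero => intro f s; simp [PySem.List.enumerate_nil]
  | succ m ih =>
    intro f s
    simp only [List.range_succ_eq_map, List.map_cons, List.map_map,
      PySem.List.enumerate_cons]
    refine List.cons_eq_cons.mpr ⟨by simp, ?_⟩
    rw [show (List.range m).map ((fun (k : Nat) => (s + (k:Int), f k)) ∘ Nat.succ)
          = (List.range m).map (fun (k : Nat) => ((s+1) + (k:Int), (f ∘ Nat.succ) k)) from
        List.map_congr_left (by
          intro k _
          simp only [Function.comp, Prod.mk.injEq]
          exact ⟨by push_cast; ring, trivial⟩)]
    exact ih (f ∘ Nat.succ) (s + 1)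

-- max() of a nonempty indexed map
theorem pyMaxList_map_range (m : Nat) (h : Nat → Int) :
    pyMaxList ((List.range (m + 1)).map h) = bmax h m := by
  induction m with
  | zero => simp [List.range_succ, pyMaxList, bmax]
  | succ m ih =>
    rw [List.range_succ (n := m + 1), List.map_append]
    have hne : (List.range (m + 1)).map h ≠ [] := by simp
    obtain ⟨a, l, hl⟩ := List.exists_cons_of_ne_nil hne
    rw [hl] at ih ⊢
    show (l ++ [h (m + 1)]).foldl max a = bmax h (m + 1)
    rw [List.foldl_append]
    simp only [List.foldl_cons, List.foldl_nil]
    rw [show l.foldl max a = bmax h m from ih, bmax]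

-- primed forms with the length as a parameter (for rewriting)
theorem zip_map_range' (l : List Int) (m : Nat) (hm : l.length = m) (f : Nat → Int) :
    ((l.zip ((List.range m).map f)).map (fun p => p.2 - p.1))
      = (List.range m).map (fun k => f k - l.getD k 0) := by
  subst hm; exact zip_map_range l f

theorem pyAccum_max_map_range (f : Nat → Int) (m : Nat) :
    pyAccum max ((List.range m).map f) = (List.range m).map (fun k => bmax f k) := by
  rw [pyAccum_max]
  simp only [List.length_map, List.length_range]
  apply List.map_congr_left; intro k hk
  apply bmax_congr; intro j hj
  exact PySem.List.getD_map_range f m j 0 (by have := List.mem_range.mp hk; omega)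

theorem reverse_map_range (l : List Int) :
    l.reverse = (List.range l.length).map (fun k => l.getD (l.length - 1 - k) 0) := by
  apply List.ext_getElem (by simp)
  intro k h1 h2
  simp only [List.getElem_reverse, List.getElem_map, List.getElem_range]
  rw [List.getD_eq_getElem l 0 (by simp only [List.length_reverse] at h1; omega)]

theorem dropLast_map_range (f : Nat → Int) (m : Nat) :
    ((List.range (m + 1)).map f).dropLast = (List.range m).map f := by
  rw [List.range_succ, List.map_append]
  exact List.dropLast_concat

-- Option-valued "if best is None or cand > best" loop
theorem foldl_optmax_range (h : Nat → Int) (m : Nat) :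
    (List.range (m + 1)).foldl (fun (acc : Option Int) k =>
      match acc with
      | none => some (h k)
      | some b => if h k > b then some (h k) else some b) none
    = some (bmax h m) := by
  induction m with
  | zero => simp [List.range_succ, bmax]
  | succ m ih =>
    rw [List.range_succ (n := m + 1), List.foldl_append, ih]
    simp only [List.foldl_cons, List.foldl_nil, bmax]
    split_ifs <;> simp <;> omega

-- the index functions both programs compute (proof-only)
def Xf (C : Int) (xv : List (Int × Int)) (k : Nat) : Int :=
  (0 :: (xv.map (fun p => p.1) ++ [C])).getD k 0
def Pf (xv : List (Int × Int)) (k : Nat) : Int :=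
  ((0 :: (xv.map (fun p => p.2) ++ [0])).take (k + 1)).sum
def Rf (xv : List (Int × Int)) (k : Nat) : Int :=
  ((0 :: (xv.map (fun p => p.2) ++ [0])).reverse.take (k + 1)).sum
def Yf (C : Int) (xv : List (Int × Int)) (k : Nat) : Int := C - Xf C xv (xv.length + 1 - k)
def Mx (C : Int) (xv : List (Int × Int)) (k : Nat) : Int := bmax (fun j => Pf xv j - Xf C xv j) k
def MxR (C : Int) (xv : List (Int × Int)) (k : Nat) : Int := bmax (fun j => Rf xv j - Yf C xv j) k
def H1 (N C : Int) (xv : List (Int × Int)) (k : Nat) : Int :=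
  Rf xv k - Yf C xv k - Yf C xv k
    + PySem.List.pyGetD ((List.range (xv.length + 2)).map (fun j => Mx C xv j)) (N - (k : Int)) 0
def H2 (N C : Int) (xv : List (Int × Int)) (k : Nat) : Int :=
  Pf xv k - Xf C xv k - Xf C xv k
    + PySem.List.pyGetD ((List.range (xv.length + 2)).map (fun j => MxR C xv j)) (N - (k : Int)) 0

theorem A_eval (N C : Int) (xv : List (Int × Int)) :
    solve N C xv
      = max (bmax (fun k => H1 N C xv k) xv.length) (bmax (fun k => H2 N C xv k) xv.length) := by
  have hxs : (0 :: (xv.map (fun p => p.1) ++ [C])).length = xv.length + 2 := by simp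
  have hvs : (0 :: (xv.map (fun p => p.2) ++ [0])).length = xv.length + 2 := by simp
  have e_ts : pyAccum (· + ·) (0 :: (xv.map (fun p => p.2) ++ [0]))
      = (List.range (xv.length + 2)).map (fun k => Pf xv k) := by
    rw [pyAccum_add, hvs]; rfl
  have e_txs : ((0 :: (xv.map (fun p => p.1) ++ [C])).zip
        ((List.range (xv.length + 2)).map (fun k => Pf xv k))).map (fun p => p.2 - p.1)
      = (List.range (xv.length + 2)).map (fun k => Pf xv k - Xf C xv k) := by
    rw [zip_map_range' _ _ hxs]; rfl
  have e_xsrev : ((0 :: (xv.map (fun p => p.1) ++ [C])).reverse).map (fun x => C - x)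
      = (List.range (xv.length + 2)).map (fun k => Yf C xv k) := by
    rw [reverse_map_range (0 :: (xv.map (fun p => p.1) ++ [C])), List.map_map, hxs]
    apply List.map_congr_left; intro k _
    simp only [Function.comp, Yf, Xf]
    rw [show xv.length + 2 - 1 - k = xv.length + 1 - k from by omega]
  have e_tsrev : pyAccum (· + ·) ((0 :: (xv.map (fun p => p.2) ++ [0])).reverse)
      = (List.range (xv.length + 2)).map (fun k => Rf xv k) := by
    rw [pyAccum_add]
    simp only [List.length_reverse, hvs]
    rfl
  have e_txsrev : (((List.range (xv.length + 2)).map (fun k => Yf C xv k)).zip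
        ((List.range (xv.length + 2)).map (fun k => Rf xv k))).map (fun p => p.2 - p.1)
      = (List.range (xv.length + 2)).map (fun k => Rf xv k - Yf C xv k) := by
    rw [zip_map_range' _ _ (by simp)]
    apply List.map_congr_left; intro k hk
    rw [PySem.List.getD_map_range _ _ _ _ (List.mem_range.mp hk)]
  have e_comp1 : (PySem.List.enumerate
        (((List.range (xv.length + 2)).map (fun k => Rf xv k - Yf C xv k)).dropLast)).map
        (fun p => p.2 - PySem.List.pyGetD ((List.range (xv.length + 2)).map (fun k => Yf C xv k)) p.1 0
          + PySem.List.pyGetD ((List.range (xv.length + 2)).map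
              (fun k => bmax (fun j => Pf xv j - Xf C xv j) k)) (N - p.1) 0)
      = (List.range (xv.length + 1)).map (fun k => H1 N C xv k) := by
    rw [show xv.length + 2 = (xv.length + 1) + 1 from rfl, dropLast_map_range,
        enumerate_map_range, List.map_map]
    apply List.map_congr_left; intro k hk
    have hk' : k < xv.length + 1 := List.mem_range.mp hk
    simp only [Function.comp, zero_add]
    rw [PySem.List.pyGetD_natCast, PySem.List.getD_map_range _ _ _ _ (by omega)]
    rfl
  have e_comp2 : (PySem.List.enumerate
        (((List.range (xv.length + 2)).map (fun k => Pf xv k - Xf C xv k)).dropLast)).map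
        (fun p => p.2 - PySem.List.pyGetD (0 :: (xv.map (fun p => p.1) ++ [C])) p.1 0
          + PySem.List.pyGetD ((List.range (xv.length + 2)).map
              (fun k => bmax (fun j => Rf xv j - Yf C xv j) k)) (N - p.1) 0)
      = (List.range (xv.length + 1)).map (fun k => H2 N C xv k) := by
    rw [show xv.length + 2 = (xv.length + 1) + 1 from rfl, dropLast_map_range,
        enumerate_map_range, List.map_map]
    apply List.map_congr_left; intro k hk
    simp only [Function.comp, zero_add]
    rw [PySem.List.pyGetD_natCast]
    rfl
  simp only [solve]
  rw [e_ts, e_txs, e_xsrev, e_tsrev, e_txsrev, pyAccum_max_map_range, pyAccum_max_map_range,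
      e_comp1, e_comp2, pyMaxList_map_range, pyMaxList_map_range]

theorem B_eval (N C : Int) (xv : List (Int × Int)) :
    solve_alt N C xv
      = bmax (fun k => max (H1 N C xv k) (H2 N C xv k)) xv.length := by
  have hxs : (0 :: (xv.map (fun p => p.1) ++ [C])).length = xv.length + 2 := by simp
  have hvs : (0 :: (xv.map (fun p => p.2) ++ [0])).length = xv.length + 2 := by simp
  have e_bxsrev : (PySem.List.pyRange 0 (((0 :: (xv.map (fun p => p.1) ++ [C])).length : Int)) 1).map
        (fun k => C - PySem.List.pyGetD (0 :: (xv.map (fun p => p.1) ++ [C]))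
          (((0 :: (xv.map (fun p => p.1) ++ [C])).length : Int) - 1 - k) 0)
      = (List.range (xv.length + 2)).map (fun k => Yf C xv k) := by
    rw [hxs, show ((xv.length + 2 : Nat) : Int) = ((xv.length + 2 : Nat) : Int) from rfl,
        PySem.List.pyRange_zero_nat, List.map_map]
    apply List.map_congr_left; intro k hk
    have hk' : k < xv.length + 2 := List.mem_range.mp hk
    simp only [Function.comp]
    rw [show (((xv.length + 2 : Nat) : Int) - 1 - (k : Int)) = ((xv.length + 1 - k : Nat) : Int)
          from by omega, PySem.List.pyGetD_natCast]
    rfl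
  have e_bvsrev : (PySem.List.pyRange 0 (((0 :: (xv.map (fun p => p.1) ++ [C])).length : Int)) 1).map
        (fun k => PySem.List.pyGetD (0 :: (xv.map (fun p => p.2) ++ [0]))
          (((0 :: (xv.map (fun p => p.1) ++ [C])).length : Int) - 1 - k) 0)
      = (0 :: (xv.map (fun p => p.2) ++ [0])).reverse := by
    rw [hxs, PySem.List.pyRange_zero_nat, List.map_map,
        reverse_map_range (0 :: (xv.map (fun p => p.2) ++ [0])), hvs]
    apply List.map_congr_left; intro k hk
    have hk' : k < xv.length + 2 := List.mem_range.mp hk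
    simp only [Function.comp]
    rw [show (((xv.length + 2 : Nat) : Int) - 1 - (k : Int)) = ((xv.length + 2 - 1 - k : Nat) : Int)
          from by omega, PySem.List.pyGetD_natCast]
  have e_btxs : (PySem.List.pyRange 0 (((0 :: (xv.map (fun p => p.1) ++ [C])).length : Int)) 1).map
        (fun k => (PySem.List.slice (0 :: (xv.map (fun p => p.2) ++ [0])) none (some (k + 1))).sum
          - PySem.List.pyGetD (0 :: (xv.map (fun p => p.1) ++ [C])) k 0)
      = (List.range (xv.length + 2)).map (fun k => Pf xv k - Xf C xv k) := by
    rw [hxs, PySem.List.pyRange_zero_nat, List.map_map]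
    apply List.map_congr_left; intro k _
    simp only [Function.comp]
    rw [show ((k : Int) + 1) = ((k + 1 : Nat) : Int) from by push_cast; ring,
        PySem.List.slice_to_natCast, PySem.List.pyGetD_natCast]
    rfl
  have e_btxsrev : (PySem.List.pyRange 0 (((0 :: (xv.map (fun p => p.1) ++ [C])).length : Int)) 1).map
        (fun k => (PySem.List.slice ((0 :: (xv.map (fun p => p.2) ++ [0])).reverse) none (some (k + 1))).sum
          - PySem.List.pyGetD ((List.range (xv.length + 2)).map (fun k => Yf C xv k)) k 0)
      = (List.range (xv.length + 2)).map (fun k => Rf xv k - Yf C xv k) := by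
    rw [hxs, PySem.List.pyRange_zero_nat, List.map_map]
    apply List.map_congr_left; intro k hk
    have hk' : k < xv.length + 2 := List.mem_range.mp hk
    simp only [Function.comp]
    rw [show ((k : Int) + 1) = ((k + 1 : Nat) : Int) from by push_cast; ring,
        PySem.List.slice_to_natCast, PySem.List.pyGetD_natCast,
        PySem.List.getD_map_range _ _ _ _ hk']
    rfl
  have take_map_range : ∀ (f : Nat → Int) (k : Nat), k < xv.length + 2 →
      ((List.range (xv.length + 2)).map f).take (k + 1) = (List.range (k + 1)).map f := by
    intro f k hk
    rw [← List.map_take, List.take_range, Nat.min_eq_left (by omega)]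
  have e_bmax : ∀ f : Nat → Int,
      (PySem.List.pyRange 0 (((0 :: (xv.map (fun p => p.1) ++ [C])).length : Int)) 1).map
        (fun k => pyMaxList (PySem.List.slice ((List.range (xv.length + 2)).map f) none (some (k + 1))))
      = (List.range (xv.length + 2)).map (fun k => bmax f k) := by
    intro f
    rw [hxs, PySem.List.pyRange_zero_nat, List.map_map]
    apply List.map_congr_left; intro k hk
    have hk' : k < xv.length + 2 := List.mem_range.mp hk
    simp only [Function.comp]
    rw [show ((k : Int) + 1) = ((k + 1 : Nat) : Int) from by push_cast; ring,
        PySem.List.slice_to_natCast, take_map_range f k hk', pyMaxList_map_range]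
  simp only [solve_alt]
  rw [e_bxsrev, e_bvsrev, e_btxs, e_btxsrev, e_bmax (fun k => Pf xv k - Xf C xv k),
      e_bmax (fun k => Rf xv k - Yf C xv k), hxs,
      show ((xv.length + 2 : Nat) : Int) - 1 = ((xv.length + 1 : Nat) : Int) from by omega,
      PySem.List.pyRange_zero_nat, List.foldl_map]
  rw [PySem.List.foldl_congr_mem _ _
      (fun (acc : Option Int) (i : Nat) =>
        match acc with
        | none => some (max (H1 N C xv i) (H2 N C xv i))
        | some b => if max (H1 N C xv i) (H2 N C xv i) > b
                    then some (max (H1 N C xv i) (H2 N C xv i)) else some b) _ ?_]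
  · rw [foldl_optmax_range (fun k => max (H1 N C xv k) (H2 N C xv k)) xv.length]
    rfl
  · intro acc i hi
    have hi' : i < xv.length + 1 := List.mem_range.mp hi
    have g1 : PySem.List.pyGetD ((List.range (xv.length + 2)).map (fun k => Rf xv k - Yf C xv k))
        (i : Int) 0 = Rf xv i - Yf C xv i := by
      rw [PySem.List.pyGetD_natCast, PySem.List.getD_map_range _ _ _ _ (by omega)]
    have g2 : PySem.List.pyGetD ((List.range (xv.length + 2)).map (fun k => Yf C xv k))
        (i : Int) 0 = Yf C xv i := by
      rw [PySem.List.pyGetD_natCast, PySem.List.getD_map_range _ _ _ _ (by omega)]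
    have g3 : PySem.List.pyGetD ((List.range (xv.length + 2)).map (fun k => Pf xv k - Xf C xv k))
        (i : Int) 0 = Pf xv i - Xf C xv i := by
      rw [PySem.List.pyGetD_natCast, PySem.List.getD_map_range _ _ _ _ (by omega)]
    have g4 : PySem.List.pyGetD (0 :: (xv.map (fun p => p.1) ++ [C])) (i : Int) 0 = Xf C xv i := by
      rw [PySem.List.pyGetD_natCast]; rfl
    simp only [g1, g2, g3, g4]
    rfl


-- ===== VERDICT (by name: the statement is the Claim_ definition above) =====
theorem solve_spec : Claim_equal_solve := by
  intro N C xv _ _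
  show solve N C xv = solve_alt N C xv
  rw [A_eval, B_eval, bmax_max]
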